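-- pv_equiv track=rewrite | github.com/cxyfer/OJ | Leetcode/python3/medium/2311_Longest Binary Subsequence Less Than or Equal to K.py | longestSubsequence
-- ===== SOURCE A (Python) =====
-- def longestSubsequence(s: str, k: int) -> int:
--     n = ans = len(s)
--     v = 0
--     for i, b in enumerate(s):
--         v |= int(b == '1') << (n - i - 1)
--     for i, b in enumerate(s):
--         if b == '1':
--             if v <= k:
--                 break
--             v ^= 1 << (n - i - 1)
--             ans -= 1
--     return ans
-- ===== SOURCE B (Python) =====
-- def longestSubsequence(s: str, k: int) -> int:
--     # Keep every non-'1' character for free; then greedily take 1-bits from the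
--     # least-significant (right) end while the accumulated value stays <= k.
--     # The place value w stops doubling once it exceeds k (no further 1-bit can
--     # fit then), so all arithmetic stays on k-sized numbers.
--     zeros = 0
--     total = 0
--     w = 1
--     taken = 0
--     for b in reversed(s):
--         if b == '1':
--             if w <= k - total:
--                 total += w
--                 taken += 1
--         else:
--             zeros += 1
--         if w <= k:
--             w *= 2
--     return zeros + taken
-- ===== Notes on version B (the rewrite author's own statement) =====
-- stated objective: faster
-- what changed: A builds the string's full big-integer value with shifts and then repeatedly XOR-clears leading 1-bits until the value fits under k; B makes a single right-to-left greedy pass that keeps every non-'1' character and adds 1-bits from the least-significant end while the running total stays <= k, with the place value capped once it exceeds k so all arithmetic stays on k-sized numbers.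
import Mathlib
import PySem

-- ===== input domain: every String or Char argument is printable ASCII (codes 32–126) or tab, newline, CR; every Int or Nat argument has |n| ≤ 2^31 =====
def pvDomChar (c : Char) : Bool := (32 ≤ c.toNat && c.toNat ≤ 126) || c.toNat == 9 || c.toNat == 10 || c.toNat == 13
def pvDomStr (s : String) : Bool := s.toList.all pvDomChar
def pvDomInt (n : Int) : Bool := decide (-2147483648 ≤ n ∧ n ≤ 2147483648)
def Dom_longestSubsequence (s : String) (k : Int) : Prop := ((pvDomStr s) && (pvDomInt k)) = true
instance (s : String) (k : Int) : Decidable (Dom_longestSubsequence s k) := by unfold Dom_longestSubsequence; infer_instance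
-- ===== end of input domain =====

-- B replaces A's build-the-whole-value-then-strip-leading-ones O(n^2)-bit scheme by a
-- single right-to-left greedy pass (take 1-bits from the least-significant end while ≤ k).

-- ===== PORT A =====
-- second loop of A, with `break` as early return; v is Python's v, which stays
-- nonnegative throughout, so it is tracked as a Nat (<<<, |||, ^^^ on Nat coincide
-- with Python's on nonnegative ints; shift amounts n-i-1 are nonnegative here)
def pvLoopA (k n : Int) : List (Int × Char) → Nat → Int → Int
  | [], _, ans => ans
  | (i, b) :: rest, v, ans =>
    if b == '1' then
      if (v : Int) ≤ k then ans
      else pvLoopA k n rest (v ^^^ (1 <<< (n - i - 1).toNat)) (ans - 1)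
    else pvLoopA k n rest v ans

def longestSubsequence (s : String) (k : Int) : Int :=
  let n : Int := s.toList.length
  let v : Nat := (PySem.List.enumerate s.toList 0).foldl
    (fun v p => v ||| ((if p.2 == '1' then 1 else 0) <<< (n - p.1 - 1).toNat)) 0
  pvLoopA k n (PySem.List.enumerate s.toList 0) v n

-- ===== PORT B =====
-- loop body of Source B; state = (zeros, total, w, taken), all nonnegative Python ints
def pvStepB (k : Int) (st : Nat × Nat × Nat × Nat) (b : Char) : Nat × Nat × Nat × Nat :=
  match st with
  | (zeros, total, w, taken) =>
    match (if b == '1' then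
             (if (w : Int) ≤ k - (total : Int) then (zeros, total + w, taken + 1)
              else (zeros, total, taken))
           else (zeros + 1, total, taken)) with
    | (zeros, total, taken) =>
      (zeros, total, (if (w : Int) ≤ k then w * 2 else w), taken)

def longestSubsequence_alt (s : String) (k : Int) : Int :=
  let st := s.toList.reverse.foldl (pvStepB k) (0, 0, 1, 0)
  ((st.1 + st.2.2.2 : Nat) : Int)

-- ===== PRECONDITION & SPEC =====
def Spec_longestSubsequence (s : String) (k : Int) (out : Int) : Prop := out = longestSubsequence_alt s k
instance (s : String) (k : Int) (out : Int) : Decidable (Spec_longestSubsequence s k out) := by unfold Spec_longestSubsequence; infer_instance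

-- ===== CLAIM (what is proved, stated in full; the proofs are below) =====
def Claim_equal_longestSubsequence : Prop := ∀ (s : String) (k : Int), Dom_longestSubsequence s k → Spec_longestSubsequence s k (longestSubsequence s k)

-- ===== LEMMAS AND PROOFS =====

-- the weights (2^position-from-right) of the '1' characters, most significant first
def pvW : List Char → List Nat
  | [] => []
  | c :: r => if c == '1' then 2 ^ r.length :: pvW r else pvW r

-- the same weights in processing order of Source B (least significant first), e = first exponent
def pvWinc : List Char → Nat → List Nat
  | [], _ => []
  | c :: r, e => if c == '1' then 2 ^ e :: pvWinc r (e + 1) else pvWinc r (e + 1)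

def pvZeros : List Char → Nat
  | [] => 0
  | c :: r => (if c == '1' then 0 else 1) + pvZeros r

-- number of leading 1-bits A's second loop clears
def pvDrop (k : Int) : List Nat → Nat
  | [] => 0
  | h :: t => if ((h + t.sum : Nat) : Int) ≤ k then 0 else 1 + pvDrop k t

-- B's greedy on the weight list (total, taken)
def pvGreedy (k : Int) : List Nat → Nat → Nat → Nat × Nat
  | [], total, taken => (total, taken)
  | x :: xs, total, taken =>
    if ((total + x : Nat) : Int) ≤ k then pvGreedy k xs (total + x) (taken + 1)
    else pvGreedy k xs total taken

theorem pv_lor_add : ∀ (p v : Nat), 2^(p+1) ∣ v → v ||| 2^p = v + 2^p := by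
  intro p
  induction p with
  | zero =>
    intro v hv
    obtain ⟨q, rfl⟩ := hv
    have h1 : (2^1 * q : Nat) = Nat.bit false q := by simp [Nat.bit]
    have h2 : (2^0 : Nat) = Nat.bit true 0 := by simp [Nat.bit]
    rw [h1, h2, Nat.lor_bit]
    simp [Nat.bit]
  | succ p ih =>
    intro v hv
    obtain ⟨q, rfl⟩ := hv
    have key := ih (2^(p+1) * q) ⟨q, rfl⟩
    generalize hm : (2^(p+1) * q : Nat) = m at key
    have h1 : (2^(p+2) * q : Nat) = Nat.bit false m := by
      simp only [Nat.bit, cond_false]; rw [← hm]; ring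
    have h2 : (2^(p+1) : Nat) = Nat.bit false (2^p) := by
      simp only [Nat.bit, cond_false]; rw [pow_succ]; ring
    rw [h1, h2, Nat.lor_bit, Bool.or_self, key]
    simp only [Nat.bit, cond_false]
    ring

theorem pv_xor_sub : ∀ (p r : Nat), r < 2^p → (2^p + r) ^^^ 2^p = r := by
  intro p
  induction p with
  | zero =>
    intro r hr
    interval_cases r
    decide
  | succ p ih =>
    intro r hr
    rcases Nat.even_or_odd r with ⟨m, hm⟩ | ⟨m, hm⟩
    · have hmlt : m < 2^p := by rw [pow_succ] at hr; omega
      have h1 : (2^(p+1) + r : Nat) = Nat.bit false (2^p + m) := by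
        simp only [Nat.bit, cond_false]; rw [pow_succ] at *; omega
      have h2 : (2^(p+1) : Nat) = Nat.bit false (2^p) := by
        simp only [Nat.bit, cond_false]; rw [pow_succ]; ring
      rw [h1, h2, Nat.xor_bit, ih m hmlt]
      simp only [Nat.bit, bne_self_eq_false, cond_false]; omega
    · have hmlt : m < 2^p := by rw [pow_succ] at hr; omega
      have h1 : (2^(p+1) + r : Nat) = Nat.bit true (2^p + m) := by
        simp only [Nat.bit, cond_true]; rw [pow_succ] at *; omega
      have h2 : (2^(p+1) : Nat) = Nat.bit false (2^p) := by
        simp only [Nat.bit, cond_false]; rw [pow_succ]; ring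
      rw [h1, h2, Nat.xor_bit, ih m hmlt]
      simp only [Nat.bit]; simp; omega

theorem pvW_sum_lt (l : List Char) : (pvW l).sum < 2 ^ l.length := by
  induction l with
  | nil => simp [pvW]
  | cons c r ih =>
    simp only [pvW, List.length_cons]
    split <;> (try simp only [List.sum_cons]) <;> rw [pow_succ] <;> omega

theorem pvZeros_length (l : List Char) : pvZeros l + (pvW l).length = l.length := by
  induction l with
  | nil => simp [pvZeros, pvW]
  | cons c r ih =>
    simp only [pvZeros, pvW]
    split <;> simp only [List.length_cons] <;> omega

theorem pvZeros_append (xs ys : List Char) : pvZeros (xs ++ ys) = pvZeros xs + pvZeros ys := by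
  induction xs with
  | nil => simp [pvZeros]
  | cons c r ih => simp [pvZeros, ih]; ring

theorem pvZeros_reverse (l : List Char) : pvZeros l.reverse = pvZeros l := by
  induction l with
  | nil => rfl
  | cons c r ih =>
    simp only [List.reverse_cons, pvZeros_append, ih, pvZeros]
    omega

theorem pvWinc_append (xs ys : List Char) (e : Nat) :
    pvWinc (xs ++ ys) e = pvWinc xs e ++ pvWinc ys (e + xs.length) := by
  induction xs generalizing e with
  | nil => simp [pvWinc]
  | cons c r ih =>
    simp only [List.cons_append, pvWinc, ih, List.length_cons]
    split <;> simp <;> ring_nf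

theorem pvWinc_reverse (l : List Char) : pvWinc l.reverse 0 = (pvW l).reverse := by
  induction l with
  | nil => rfl
  | cons c r ih =>
    simp only [List.reverse_cons, pvWinc_append, ih, pvW, pvWinc]
    split <;> simp [List.length_reverse]

-- ===== A-side characterisation =====

theorem pv_foldA (n : Int) :
    ∀ (l : List Char) (i : Int) (v : Nat), i + l.length = n → 2 ^ l.length ∣ v →
    (PySem.List.enumerate l i).foldl
      (fun v p => v ||| ((if p.2 == '1' then 1 else 0) <<< (n - p.1 - 1).toNat)) v
      = v + (pvW l).sum := by
  intro l
  induction l with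
  | nil => intro i v _ _; simp [pvW]
  | cons c r ih =>
    intro i v hi hv
    rw [PySem.List.enumerate_cons, List.foldl_cons]
    have hexp : (n - i - 1).toNat = r.length := by
      simp only [List.length_cons] at hi; omega
    by_cases hc : c == '1'
    · have hdvd : 2 ^ (r.length + 1) ∣ v := by
        simpa [List.length_cons, pow_succ] using hv
      have hbit : v ||| ((1 : Nat) <<< (n - i - 1).toNat) = v + 2 ^ r.length := by
        rw [hexp, Nat.shiftLeft_eq, one_mul, pv_lor_add r.length v hdvd]
      have hdvd' : 2 ^ r.length ∣ v + 2 ^ r.length := by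
        exact Dvd.dvd.add (dvd_trans (pow_dvd_pow 2 (Nat.le_succ _)) hdvd) dvd_rfl
      rw [if_pos hc] at *
      rw [hbit, ih (i + 1) (v + 2 ^ r.length) (by simp only [List.length_cons] at hi; omega) hdvd']
      simp [pvW, hc]
      omega
    · rw [if_neg hc]
      have h0 : v ||| ((0 : Nat) <<< (n - i - 1).toNat) = v := by
        simp [Nat.shiftLeft_eq]
      rw [h0, ih (i + 1) v (by simp only [List.length_cons] at hi; omega)
        (dvd_trans (pow_dvd_pow 2 (by simp [List.length_cons])) hv)]
      simp [pvW, hc]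

theorem pv_loopA (n k : Int) :
    ∀ (l : List Char) (i ans : Int), i + l.length = n →
    pvLoopA k n (PySem.List.enumerate l i) (pvW l).sum ans = ans - pvDrop k (pvW l) := by
  intro l
  induction l with
  | nil => intro i ans _; simp [pvLoopA, pvW, pvDrop]
  | cons c r ih =>
    intro i ans hi
    rw [PySem.List.enumerate_cons]
    by_cases hc : c == '1'
    · have hexp : (n - i - 1).toNat = r.length := by
        simp only [List.length_cons] at hi; omega
      simp only [pvW, hc, if_pos, List.sum_cons, pvLoopA]
      by_cases hk : ((2 ^ r.length + (pvW r).sum : Nat) : Int) ≤ k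
      · rw [if_pos hk, pvDrop, if_pos (by push_cast; push_cast at hk; omega)]
        simp
      · rw [if_neg hk, pvDrop, if_neg (by push_cast; push_cast at hk; omega)]
        have hx : (2 ^ r.length + (pvW r).sum) ^^^ (1 <<< (n - i - 1).toNat) = (pvW r).sum := by
          rw [hexp, Nat.shiftLeft_eq, one_mul, pv_xor_sub r.length _ (pvW_sum_lt r)]
        rw [hx, ih (i + 1) (ans - 1) (by simp only [List.length_cons] at hi; omega)]
        push_cast
        ring
    · simp only [pvW, pvLoopA]
      simp only [Bool.not_eq_true] at hc
      simp only [hc, Bool.false_eq_true, if_false]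
      exact ih (i + 1) ans (by simp only [List.length_cons] at hi; omega)

theorem pv_A_char (s : String) (k : Int) :
    longestSubsequence s k = (s.toList.length : Int) - pvDrop k (pvW s.toList) := by
  unfold longestSubsequence
  dsimp only
  rw [pv_foldA (s.toList.length) s.toList 0 0 (by simp) (by simp)]
  simpa using pv_loopA (s.toList.length) k s.toList 0 (s.toList.length) (by simp)

-- ===== B-side characterisation =====

def pvCapInv (k : Int) (e w : Nat) : Prop := w = 2 ^ e ∨ (k < (w : Int) ∧ w ≤ 2 ^ e)

theorem pv_foldB (k : Int) :
    ∀ (r : List Char) (zeros total taken e w : Nat), pvCapInv k e w →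
    ∃ w', r.foldl (pvStepB k) (zeros, total, w, taken) =
      (zeros + pvZeros r, (pvGreedy k (pvWinc r e) total taken).1,
       w', (pvGreedy k (pvWinc r e) total taken).2) := by
  intro r
  induction r with
  | nil =>
    intro zeros total taken e w _
    exact ⟨w, by simp [pvZeros, pvWinc, pvGreedy]⟩
  | cons c t ih =>
    intro zeros total taken e w hinv
    rw [List.foldl_cons]
    have hwnew : pvCapInv k (e + 1) (if (w : Int) ≤ k then w * 2 else w) := by
      rcases hinv with rfl | ⟨hk, hle⟩
      · by_cases hwk : ((2 ^ e : Nat) : Int) ≤ k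
        · rw [if_pos hwk]; left; rw [pow_succ]
        · rw [if_neg hwk]; right
          refine ⟨by push_cast at hwk ⊢; omega, ?_⟩
          rw [pow_succ]; omega
      · rw [if_neg (by omega)]
        right
        refine ⟨hk, le_trans hle ?_⟩
        rw [pow_succ]; omega
    by_cases hc : c == '1'
    · by_cases hk : ((total + 2 ^ e : Nat) : Int) ≤ k
      · have hw : w = 2 ^ e := by
          rcases hinv with rfl | ⟨hgt, hle⟩
          · rfl
          · exfalso
            have hle' : (w : Int) ≤ (2 : Int) ^ e := by exact_mod_cast hle
            push_cast at hk
            omega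
        have hcond : (w : Int) ≤ k - (total : Int) := by rw [hw]; push_cast at hk ⊢; omega
        simp only [pvStepB, hc, if_true, if_pos hcond]
        obtain ⟨w', hw'⟩ := ih zeros (total + w) (taken + 1) (e + 1) _ hwnew
        refine ⟨w', ?_⟩
        rw [hw']
        have hk' : (total : Int) + (2 : Int) ^ e ≤ k := by push_cast at hk; exact hk
        simp [pvWinc, pvZeros, hc, pvGreedy, hk', hw]
      · have hcond : ¬ (w : Int) ≤ k - (total : Int) := by
          rcases hinv with rfl | ⟨hgt, hle⟩
          · push_cast at hk ⊢; omega
          · omega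
        simp only [pvStepB, hc, if_true, if_neg hcond]
        obtain ⟨w', hw'⟩ := ih zeros total taken (e + 1) _ hwnew
        refine ⟨w', ?_⟩
        rw [hw']
        have hk' : ¬ ((total : Int) + (2 : Int) ^ e ≤ k) := by push_cast at hk; exact hk
        simp [pvWinc, pvZeros, hc, pvGreedy, hk']
    · simp only [pvStepB]
      simp only [Bool.not_eq_true] at hc
      simp only [hc, Bool.false_eq_true, if_false]
      obtain ⟨w', hw'⟩ := ih (zeros + 1) total taken (e + 1) _ hwnew
      refine ⟨w', ?_⟩
      rw [hw']
      simp only [pvWinc, pvZeros, hc, Bool.false_eq_true, if_false, Prod.mk.injEq]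
      exact ⟨by omega, trivial⟩

theorem pv_B_char (s : String) (k : Int) :
    longestSubsequence_alt s k =
      ((pvZeros s.toList + (pvGreedy k ((pvW s.toList).reverse) 0 0).2 : Nat) : Int) := by
  unfold longestSubsequence_alt
  obtain ⟨w', hw'⟩ := pv_foldB k s.toList.reverse 0 0 0 0 1 (Or.inl rfl)
  dsimp only
  rw [hw', pvWinc_reverse, pvZeros_reverse]
  simp

-- ===== greedy vs drop =====

def pvDec : List Nat → Prop
  | [] => True
  | h :: t => t.sum < h ∧ pvDec t

theorem pvDec_pvW (l : List Char) : pvDec (pvW l) := by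
  induction l with
  | nil => trivial
  | cons c r ih =>
    simp only [pvW]
    split
    · exact ⟨pvW_sum_lt r, ih⟩
    · exact ih

theorem pvGreedy_append (k : Int) (xs ys : List Nat) :
    ∀ total taken, pvGreedy k (xs ++ ys) total taken =
      pvGreedy k ys (pvGreedy k xs total taken).1 (pvGreedy k xs total taken).2 := by
  induction xs with
  | nil => intro total taken; simp [pvGreedy]
  | cons x t ih =>
    intro total taken
    simp only [List.cons_append, pvGreedy]
    split <;> exact ih _ _

theorem pvGreedy_all (k : Int) (xs : List Nat) :
    ∀ total taken, ((total + xs.sum : Nat) : Int) ≤ k →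
    pvGreedy k xs total taken = (total + xs.sum, taken + xs.length) := by
  induction xs with
  | nil => intro total taken _; simp [pvGreedy]
  | cons x t ih =>
    intro total taken h
    simp only [List.sum_cons] at h
    have h' : ((total + x + t.sum : Nat) : Int) ≤ k := by rw [Nat.add_assoc]; exact h
    have h1 : ((total + x : Nat) : Int) ≤ k :=
      le_trans (by exact_mod_cast Nat.le_add_right (total + x) t.sum) h'
    simp only [pvGreedy]
    rw [if_pos h1, ih (total + x) (taken + 1) h']
    simp only [List.sum_cons, List.length_cons, Prod.mk.injEq]
    omega

theorem pvGreedy_mono (k : Int) (xs : List Nat) :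
    ∀ total taken, total ≤ (pvGreedy k xs total taken).1 := by
  induction xs with
  | nil => intro total taken; simp [pvGreedy]
  | cons x t ih =>
    intro total taken
    simp only [pvGreedy]
    split
    · exact le_trans (Nat.le_add_right _ _) (ih _ _)
    · exact ih _ _

theorem pvGreedy_stuck (k : Int) (xs : List Nat) :
    ∀ total taken, (pvGreedy k xs total taken).1 = total + xs.sum ∨
      ∃ w ∈ xs, ¬ (((pvGreedy k xs total taken).1 + w : Nat) : Int) ≤ k := by
  induction xs with
  | nil => intro total taken; left; simp [pvGreedy]
  | cons x t ih =>
    intro total taken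
    simp only [pvGreedy]
    by_cases hk : ((total + x : Nat) : Int) ≤ k
    · rw [if_pos hk]
      rcases ih (total + x) (taken + 1) with h | ⟨w, hw, hng⟩
      · left; simp only [h, List.sum_cons]; omega
      · right; exact ⟨w, List.mem_cons_of_mem _ hw, hng⟩
    · rw [if_neg hk]
      right
      refine ⟨x, List.mem_cons_self, ?_⟩
      have := pvGreedy_mono k t total taken
      push_cast at hk ⊢
      omega

theorem pv_core (k : Int) :
    ∀ ws : List Nat, pvDec ws →
    (pvGreedy k ws.reverse 0 0).2 + pvDrop k ws = ws.length := by
  intro ws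
  induction ws with
  | nil => intro _; simp [pvGreedy, pvDrop]
  | cons h t ih =>
    intro hdec
    obtain ⟨hlt, hdec'⟩ := hdec
    by_cases hk : ((h + t.sum : Nat) : Int) ≤ k
    · rw [pvDrop, if_pos hk]
      rw [List.reverse_cons, pvGreedy_all k (t.reverse ++ [h]) 0 0 (by simpa using (by push_cast at hk ⊢; omega : ((0 + (t.sum + h) : Nat) : Int) ≤ k))]
      simp
    · rw [pvDrop, if_neg hk, List.reverse_cons, pvGreedy_append]
      have hT := pvGreedy_stuck k t.reverse 0 0
      set T := (pvGreedy k t.reverse 0 0).1 with hTdef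
      set N := (pvGreedy k t.reverse 0 0).2 with hNdef
      have hnot : ¬ ((T + h : Nat) : Int) ≤ k := by
        rcases hT with hall | ⟨w, hw, hng⟩
        · simp only [List.sum_reverse, Nat.zero_add] at hall
          push_cast [hall] at hk ⊢
          omega
        · have hwle : w ≤ t.sum := List.single_le_sum (by intro x _; exact Nat.zero_le x) _ (by simpa using hw)
          push_cast at hng ⊢
          omega
      simp only [pvGreedy, if_neg hnot]
      have := ih hdec'
      simp only [List.length_cons]
      omega

-- ===== final =====

theorem longestSubsequence_eq (s : String) (k : Int) :
    longestSubsequence s k = longestSubsequence_alt s k := by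
  rw [pv_A_char, pv_B_char]
  have hcore := pv_core k (pvW s.toList) (pvDec_pvW s.toList)
  have hz := pvZeros_length s.toList
  push_cast
  omega

-- ===== VERDICT (by name: the statement is the Claim_ definition above) =====
theorem longestSubsequence_spec : Claim_equal_longestSubsequence := by
  intro s k _
  unfold Spec_longestSubsequence
  exact longestSubsequence_eq s k
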